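-- pv_equiv track=rewrite | github.com/vuductung/proteomics-downstream-analysis | proteomics_downstream_analysis/utils.py | add_suffixes
-- ===== SOURCE A (Python) =====
-- def add_suffixes(original_list):
--     result = []
--     counts = {}
--
--     for item in original_list:
--         if item in counts:
--             counts[item] += 1
--             result.append(f"{item}_{counts[item]}")
--         else:
--             counts[item] = 0
--             result.append(item)
--
--     return result
-- ===== SOURCE B (Python) =====
-- def add_suffixes(original_list):
--     positions = {}
--     for i, item in enumerate(original_list):
--         positions.setdefault(item, []).append(i)
--     result = [""] * len(original_list)
--     for item, idxs in positions.items():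
--         for k, i in enumerate(idxs):
--             result[i] = item if k == 0 else f"{item}_{k}"
--     return result
-- ===== Notes on version B (the rewrite author's own statement) =====
-- stated objective: alternative
-- what changed: Instead of A's single pass with a running-count dict that appends each suffixed item as it goes, B first groups the indices of each item into a dict of position lists, then fills a preallocated result by writing the bare item at each group's first position and item_k at its k-th later position.
import Mathlib
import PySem

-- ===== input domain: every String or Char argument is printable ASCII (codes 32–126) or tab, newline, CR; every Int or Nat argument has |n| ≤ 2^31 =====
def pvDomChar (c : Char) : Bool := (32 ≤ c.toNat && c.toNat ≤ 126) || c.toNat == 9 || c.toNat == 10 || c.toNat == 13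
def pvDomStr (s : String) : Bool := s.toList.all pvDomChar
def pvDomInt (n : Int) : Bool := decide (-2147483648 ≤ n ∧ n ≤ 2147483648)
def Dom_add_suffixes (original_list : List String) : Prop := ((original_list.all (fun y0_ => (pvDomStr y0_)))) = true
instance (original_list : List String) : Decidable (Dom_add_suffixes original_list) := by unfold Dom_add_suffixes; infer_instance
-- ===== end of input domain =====

-- B replaces A's single pass with a running-count dict by group-then-fill: it first
-- groups each item's indices into a dict, then fills a preallocated result per group.

-- ===== PORT A =====
-- one loop step of A: state is (result, counts)
def addSuffixesStep (st : List String × PySem.Dict String Int) (item : String) :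
    List String × PySem.Dict String Int :=
  match (st.2).get? item with
  | some c => (st.1 ++ [item ++ "_" ++ PySem.Int.toStr (c + 1)], st.2.insert item (c + 1))
  | none => (st.1 ++ [item], st.2.insert item 0)

def add_suffixes (original_list : List String) : List String :=
  (original_list.foldl addSuffixesStep ([], PySem.Dict.empty)).1

-- ===== PORT B =====
def add_suffixes_alt (original_list : List String) : List String :=
  -- positions.setdefault(item, []).append(i)  ≙  modify with default []
  let positions : PySem.Dict String (List Int) :=
    (PySem.List.enumerate original_list).foldl
      (fun d p => d.modify p.2 [] (fun v => v ++ [p.1])) PySem.Dict.empty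
  -- result = [""] * len(original_list); then fill per group
  positions.items.foldl
    (fun res pr =>
      (PySem.List.enumerate pr.2).foldl
        (fun res q =>
          PySem.List.pySetD res q.2
            (if q.1 = 0 then pr.1 else pr.1 ++ "_" ++ PySem.Int.toStr q.1))
        res)
    (List.replicate original_list.length "")

-- ===== PRECONDITION & SPEC =====
def Spec_add_suffixes (original_list : List String) (out : List String) : Prop := out = add_suffixes_alt original_list
instance (original_list : List String) (out : List String) : Decidable (Spec_add_suffixes original_list out) := by unfold Spec_add_suffixes; infer_instance

-- ===== CLAIM (what is proved, stated in full; the proofs are below) =====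
def Claim_equal_add_suffixes : Prop := ∀ (original_list : List String), Dom_add_suffixes original_list → Spec_add_suffixes original_list (add_suffixes original_list)

-- ===== LEMMAS AND PROOFS =====

-- the common per-position value: bare item for the first occurrence, item_c for the c-th later one
def sufVal (x : String) (c : Int) : String :=
  if c = 0 then x else x ++ "_" ++ PySem.Int.toStr c

-- intended value at position j: the item suffixed by its number of earlier occurrences
def gVal (l : List String) (j : Nat) : String :=
  sufVal (l.getD j "") (((l.take j).count (l.getD j "") : Int))

def specList (l : List String) : List String := (List.range l.length).map (gVal l)

-- indices (as Int, in increasing order) at which x occurs in l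
def occIdx (l : List String) (x : String) : List Int :=
  ((PySem.List.enumerate l).filter (fun p => p.2 == x)).map (·.1)

lemma gval_append (l : List String) (y : String) (j : Nat) (hj : j < l.length) :
    gVal (l ++ [y]) j = gVal l j := by
  unfold gVal
  rw [List.getD_append _ _ _ _ hj, List.take_append_of_le_length (Nat.le_of_lt hj)]

lemma gval_last (l : List String) (y : String) :
    gVal (l ++ [y]) l.length = sufVal y ((l.count y : Int)) := by
  unfold gVal
  rw [List.getD_append_right _ _ _ _ (Nat.le_refl _), Nat.sub_self]
  simp

lemma specList_append (l : List String) (x : String) :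
    specList (l ++ [x]) = specList l ++ [sufVal x ((l.count x : Int))] := by
  unfold specList
  rw [List.length_append, List.length_singleton, List.range_succ, List.map_append]
  congr 1
  · exact List.map_congr_left (fun j hj => gval_append l x j (List.mem_range.mp hj))
  · simp [gval_last]

-- ---------- A's loop equals specList ----------

lemma snd_foldl_addSuffixesStep (l : List String) (r : List String) (d : PySem.Dict String Int) :
    (l.foldl addSuffixesStep (r, d)).2 =
      l.foldl (fun d item =>
        match d.get? item with
        | some c => d.insert item (c + 1)
        | none => d.insert item 0) d := by
  induction l generalizing r d with
  | nil => rfl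
  | cons x l ih =>
    simp only [List.foldl_cons, addSuffixesStep]
    cases h : d.get? x <;> simp [ih]

lemma get?_dloop (l : List String) (x : String) :
    (l.foldl (fun d item =>
        match d.get? item with
        | some c => d.insert item (c + 1)
        | none => d.insert item 0) (PySem.Dict.empty : PySem.Dict String Int)).get? x =
      if l.count x = 0 then none else some ((l.count x : Int) - 1) := by
  induction l using List.reverseRecOn with
  | nil => simp [PySem.Dict.get?_empty]
  | append_singleton l y ih =>
    rw [List.foldl_append]
    simp only [List.foldl_cons, List.foldl_nil]
    by_cases hxy : x = y
    · subst hxy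
      cases hc : (l.foldl (fun d item =>
          match d.get? item with
          | some c => d.insert item (c + 1)
          | none => d.insert item 0) (PySem.Dict.empty : PySem.Dict String Int)).get? x with
      | none =>
        rw [ih] at hc
        have h0 : l.count x = 0 := by by_contra h; simp [h] at hc
        simp [PySem.Dict.get?_insert_self, List.count_append, h0]
      | some c =>
        rw [ih] at hc
        have h0 : l.count x ≠ 0 := by by_contra h; simp [h] at hc
        have hc' : c = (l.count x : Int) - 1 := by
          by_cases h : l.count x = 0
          · exact absurd h h0
          · simp [h] at hc; omega
        subst hc'
        simp [PySem.Dict.get?_insert_self, List.count_append]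
    · cases hc : (l.foldl (fun d item =>
          match d.get? item with
          | some c => d.insert item (c + 1)
          | none => d.insert item 0) (PySem.Dict.empty : PySem.Dict String Int)).get? y <;>
      · simp only []
        rw [PySem.Dict.get?_insert_of_ne _ _ hxy, ih]
        simp [List.count_append, Ne.symm hxy]

lemma a_eq_spec (l : List String) : add_suffixes l = specList l := by
  induction l using List.reverseRecOn with
  | nil => rfl
  | append_singleton l x ih =>
    have key : add_suffixes (l ++ [x]) =
        (addSuffixesStep (l.foldl addSuffixesStep ([], PySem.Dict.empty)) x).1 := by
      simp [add_suffixes, List.foldl_append]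
    rw [key, specList_append, ← ih]
    simp only [addSuffixesStep]
    rw [snd_foldl_addSuffixesStep, get?_dloop]
    by_cases h : l.count x = 0
    · simp [h, add_suffixes, sufVal]
    · have harith : (l.count x : Int) - 1 + 1 = (l.count x : Int) := by ring
      simp [h, add_suffixes, sufVal, harith]

-- ---------- B's group-then-fill equals specList ----------

lemma occ_getD (l : List String) (x : String) :
    ((PySem.List.enumerate l).foldl
        (fun d p => d.modify p.2 [] (fun v => v ++ [p.1]))
        (PySem.Dict.empty : PySem.Dict String (List Int))).getD x [] = occIdx l x := by
  have h1 : (PySem.List.enumerate l).foldl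
        (fun d p => d.modify p.2 [] (fun v => v ++ [p.1]))
        (PySem.Dict.empty : PySem.Dict String (List Int)) =
      ((PySem.List.enumerate l).map Prod.swap).foldl
        (fun d p => d.modify p.1 [] (fun v => v ++ [p.2]))
        (PySem.Dict.empty : PySem.Dict String (List Int)) := by
    rw [List.foldl_map]; rfl
  rw [h1, PySem.Dict.getD_foldl_modify_append]
  simp [occIdx, List.filter_map, PySem.Dict.getD_empty, Function.comp_def, Prod.swap]

lemma keys_positions (l : List String) :
    ((PySem.List.enumerate l).foldl
        (fun d p => d.modify p.2 [] (fun v => v ++ [p.1]))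
        (PySem.Dict.empty : PySem.Dict String (List Int))).keys = PySem.Set.ofList l := by
  rw [PySem.Dict.keys_foldl_modify_key]
  simp [PySem.List.map_snd_enumerate, PySem.Set.update_nil_left]

lemma occ_append (l : List String) (y x : String) :
    occIdx (l ++ [y]) x = occIdx l x ++ (if y = x then [((l.length : Int))] else []) := by
  unfold occIdx
  rw [PySem.List.enumerate_append]
  simp only [List.filter_append, List.map_append]
  congr 1
  by_cases h : y = x <;>
    simp [PySem.List.enumerate_cons, PySem.List.enumerate_nil, h]

lemma length_occ (l : List String) (x : String) : (occIdx l x).length = l.count x := by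
  induction l using List.reverseRecOn with
  | nil => rfl
  | append_singleton l y ih =>
    rw [occ_append]
    by_cases h : y = x <;> simp [h, ih, List.count_append]

lemma fill_len (idxs : List (Int × Int)) (f : Int → String) :
    ∀ res : List String,
      (idxs.foldl (fun r q => PySem.List.pySetD r q.2 (f q.1)) res).length = res.length := by
  induction idxs with
  | nil => intro res; rfl
  | cons q idxs ih =>
    intro res
    simp only [List.foldl_cons]
    rw [ih, PySem.List.length_pySetD]

lemma fill_one (l : List String) (x : String) :
    ∀ (res : List String), l.length ≤ res.length → ∀ j : Nat,
      ((PySem.List.enumerate (occIdx l x)).foldl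
          (fun r q => PySem.List.pySetD r q.2 (sufVal x q.1)) res)[j]? =
        if j < l.length then
          (if l.getD j "" = x then some (gVal l j) else res[j]?)
        else res[j]? := by
  induction l using List.reverseRecOn with
  | nil =>
    intro res _ j
    simp [occIdx, PySem.List.enumerate_nil]
  | append_singleton l y ih =>
    intro res hlen j
    have hlen' : l.length ≤ res.length := by
      rw [List.length_append, List.length_singleton] at hlen; omega
    rw [occ_append]
    by_cases hyx : y = x
    · subst hyx
      rw [if_pos rfl, PySem.List.enumerate_append, List.foldl_append]
      simp only [PySem.List.enumerate_cons, PySem.List.enumerate_nil, List.foldl_cons,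
        List.foldl_nil, zero_add, length_occ]
      rw [PySem.List.pySetD_natCast, List.getElem?_set]
      by_cases hjn : l.length = j
      · subst hjn
        have hF1 : ((PySem.List.enumerate (occIdx l y)).foldl
            (fun r q => PySem.List.pySetD r q.2 (sufVal y q.1)) res).length = res.length :=
          fill_len _ _ res
        rw [if_pos rfl, hF1]
        have hlt : l.length < res.length := by
          rw [List.length_append, List.length_singleton] at hlen; omega
        rw [if_pos hlt, if_pos (by simp)]
        have : (l ++ [y]).getD l.length "" = y := by
          simp
        rw [this, if_pos rfl, gval_last]
      · rw [if_neg hjn, ih res hlen' j]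
        by_cases hj : j < l.length
        · rw [if_pos hj, if_pos (show j < (l ++ [y]).length by simp; omega),
            List.getD_append _ _ _ _ hj, gval_append l y j hj]
        · rw [if_neg hj, if_neg (show ¬ j < (l ++ [y]).length by simp; omega)]
    · rw [if_neg hyx]
      simp only [List.append_nil]
      rw [ih res hlen' j]
      by_cases hj : j < l.length
      · rw [if_pos hj, if_pos (show j < (l ++ [y]).length by simp; omega),
          List.getD_append _ _ _ _ hj, gval_append l y j hj]
      · rw [if_neg hj]
        by_cases hj1 : j < l.length + 1
        · have hjeq : j = l.length := by omega
          subst hjeq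
          rw [if_pos (by simp)]
          have : (l ++ [y]).getD l.length "" = y := by
            simp
          rw [this, if_neg hyx]
        · rw [if_neg (show ¬ j < (l ++ [y]).length by simp; omega)]

lemma fill_all (l : List String) (ks : List String) :
    ∀ (res : List String), l.length ≤ res.length → ∀ j : Nat,
      ((ks.map (fun k => (k, occIdx l k))).foldl
          (fun res pr =>
            (PySem.List.enumerate pr.2).foldl
              (fun r q => PySem.List.pySetD r q.2 (sufVal pr.1 q.1)) res) res)[j]? =
        if j < l.length ∧ l.getD j "" ∈ ks then some (gVal l j) else res[j]? := by
  induction ks with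
  | nil => intro res _ j; simp
  | cons k ks ih =>
    intro res hlen j
    simp only [List.map_cons, List.foldl_cons]
    have hlen' : ((PySem.List.enumerate (occIdx l k)).foldl
        (fun r q => PySem.List.pySetD r q.2 (sufVal k q.1)) res).length = res.length :=
      fill_len _ _ res
    rw [ih _ (by omega) j, fill_one l k res hlen j]
    by_cases hj : j < l.length
    · by_cases hmem : l.getD j "" ∈ ks
      · rw [if_pos ⟨hj, hmem⟩, if_pos ⟨hj, List.mem_cons_of_mem _ hmem⟩]
      · by_cases hk : l.getD j "" = k
        · rw [if_neg (by tauto), if_pos hj, if_pos hk,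
            if_pos ⟨hj, hk ▸ List.mem_cons_self⟩]
        · rw [if_neg (by tauto), if_pos hj, if_neg hk,
            if_neg (by simp only [List.mem_cons]; tauto)]
    · rw [if_neg (by tauto), if_neg hj, if_neg (by tauto)]

lemma b_eq_spec (l : List String) : add_suffixes_alt l = specList l := by
  unfold add_suffixes_alt
  have hnodup : ((PySem.List.enumerate l).foldl
      (fun d p => d.modify p.2 [] (fun v => v ++ [p.1]))
      (PySem.Dict.empty : PySem.Dict String (List Int))).keys.Nodup := by
    rw [keys_positions]; exact PySem.Set.nodup_ofList l
  have hitems : ((PySem.List.enumerate l).foldl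
      (fun d p => d.modify p.2 [] (fun v => v ++ [p.1]))
      (PySem.Dict.empty : PySem.Dict String (List Int))).items =
      (PySem.Set.ofList l).map (fun k => (k, occIdx l k)) := by
    rw [PySem.Dict.items_eq_map_keys _ hnodup []]
    rw [keys_positions]
    exact List.map_congr_left (fun k _ => by rw [occ_getD])
  show (((PySem.List.enumerate l).foldl
      (fun d p => d.modify p.2 [] (fun v => v ++ [p.1]))
      (PySem.Dict.empty : PySem.Dict String (List Int))).items).foldl
      (fun res pr =>
        (PySem.List.enumerate pr.2).foldl
          (fun res q =>
            PySem.List.pySetD res q.2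
              (if q.1 = 0 then pr.1 else pr.1 ++ "_" ++ PySem.Int.toStr q.1)) res)
      (List.replicate l.length "") = specList l
  rw [hitems]
  apply List.ext_getElem?
  intro j
  have hfold := fill_all l (PySem.Set.ofList l) (List.replicate l.length "")
    (by simp) j
  rw [show (fun (res : List String) (pr : String × List Int) =>
      (PySem.List.enumerate pr.2).foldl
        (fun res q =>
          PySem.List.pySetD res q.2
            (if q.1 = 0 then pr.1 else pr.1 ++ "_" ++ PySem.Int.toStr q.1)) res) =
      (fun (res : List String) (pr : String × List Int) =>
        (PySem.List.enumerate pr.2).foldl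
          (fun r q => PySem.List.pySetD r q.2 (sufVal pr.1 q.1)) res) from rfl]
  rw [hfold]
  by_cases hj : j < l.length
  · have hmem : l.getD j "" ∈ l := by
      rw [List.getD_eq_getElem _ _ hj]; exact List.getElem_mem hj
    rw [if_pos ⟨hj, (PySem.Set.mem_ofList _ _).mpr hmem⟩]
    simp [specList, List.getElem?_map, List.getElem?_range hj]
  · rw [if_neg (by tauto)]
    simp only [specList]
    rw [List.getElem?_eq_none (by simpa using Nat.le_of_not_lt hj),
      List.getElem?_eq_none (by simp [Nat.le_of_not_lt hj])]

-- ===== VERDICT (by name: the statement is the Claim_ definition above) =====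
theorem add_suffixes_spec : Claim_equal_add_suffixes := by
  intro l _
  unfold Spec_add_suffixes
  exact (a_eq_spec l).trans (b_eq_spec l).symm
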